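-- pv_equiv track=rewrite | github.com/dapicom-ai/Rendara.ai | backend/services/stream_processor.py | _max_partial_sentinel_suffix
-- ===== SOURCE A (Python) =====
-- VIZ_START = "<<<VIZ_START>>>"
--
-- VIZ_END = "<<<VIZ_END>>>"
--
-- MMD_START = "<<<MMD_START>>>"
--
-- MMD_END = "<<<MMD_END>>>"
--
-- def _max_partial_sentinel_suffix(text: str) -> int:
--     """
--     Return the length of the longest suffix of `text` that is a prefix
--     of any sentinel string. Used to avoid emitting text that could be
--     the start of a sentinel split across chunks.
--     """
--     sentinels = [VIZ_START, VIZ_END, MMD_START, MMD_END]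
--     max_len = 0
--     for sentinel in sentinels:
--         for length in range(1, min(len(sentinel), len(text)) + 1):
--             if sentinel.startswith(text[-length:]):
--                 if length > max_len:
--                     max_len = length
--     return max_len
-- ===== SOURCE B (Python) =====
-- VIZ_START = "<<<VIZ_START>>>"
-- VIZ_END = "<<<VIZ_END>>>"
-- MMD_START = "<<<MMD_START>>>"
-- MMD_END = "<<<MMD_END>>>"
--
-- def _max_partial_sentinel_suffix(text: str) -> int:
--     sentinels = [VIZ_START, VIZ_END, MMD_START, MMD_END]
--     prefixes = {s[:i] for s in sentinels for i in range(1, len(s) + 1)}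
--     max_len = max(len(s) for s in sentinels)
--     for length in range(min(max_len, len(text)), 0, -1):
--         if text[-length:] in prefixes:
--             return length
--     return 0
-- ===== Notes on version B (the rewrite author's own statement) =====
-- stated objective: alternative
-- what changed: Replaces the nested per-sentinel ascending scan (running max) with a precomputed set of all non-empty sentinel prefixes and a single descending loop over suffix lengths that returns on the first hit.
import Mathlib
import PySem

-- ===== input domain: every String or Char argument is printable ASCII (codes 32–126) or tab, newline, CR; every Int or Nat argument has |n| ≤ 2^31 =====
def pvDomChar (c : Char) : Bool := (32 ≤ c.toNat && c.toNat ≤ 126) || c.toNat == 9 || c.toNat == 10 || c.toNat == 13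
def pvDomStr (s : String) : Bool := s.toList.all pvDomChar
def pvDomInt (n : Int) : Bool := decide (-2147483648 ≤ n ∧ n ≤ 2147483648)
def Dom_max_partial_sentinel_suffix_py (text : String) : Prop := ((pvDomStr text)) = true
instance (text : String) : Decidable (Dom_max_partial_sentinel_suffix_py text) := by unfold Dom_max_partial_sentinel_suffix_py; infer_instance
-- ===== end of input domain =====

-- B replaces A's nested per-sentinel ascending scan with a precomputed set of all
-- non-empty sentinel prefixes and a single descending loop over suffix lengths
-- (first hit = maximum); same return value, no speed claim.

-- ===== PORT A =====
-- module constants (shared by both Python versions)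
def pvSentinels : List String := ["<<<VIZ_START>>>", "<<<VIZ_END>>>", "<<<MMD_START>>>", "<<<MMD_END>>>"]

def max_partial_sentinel_suffix_py (text : String) : Int :=
  pvSentinels.foldl (fun maxLen sentinel =>
    (PySem.List.pyRange 1 (min (PySem.Str.len sentinel) (PySem.Str.len text) + 1) 1).foldl
      (fun maxLen length =>
        if PySem.Str.startswith sentinel (PySem.Str.slice text (some (-length)) none) then
          (if length > maxLen then length else maxLen)
        else maxLen)
      maxLen) 0

-- ===== PORT B =====
-- {s[:i] for s in sentinels for i in range(1, len(s)+1)} — only membership is queried, so set order is irrelevant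
def pvPrefixes : PySem.Set String :=
  PySem.Set.ofList (pvSentinels.flatMap fun s =>
    (PySem.List.pyRange 1 (PySem.Str.len s + 1) 1).map fun i => PySem.Str.slice s none (some i))

-- max(len(s) for s in sentinels); the list is a non-empty literal so Python's max returns (the getD default is unreachable)
def pvMaxLen : Int := ((PySem.List.max? (pvSentinels.map PySem.Str.len) (fun x => x)).getD 0)

-- the 'for length in range(…, 0, -1): if …: return length' loop
def pvScanB (text : String) : List Int → Int
  | [] => 0
  | length :: rest =>
      if PySem.Set.contains pvPrefixes (PySem.Str.slice text (some (-length)) none) then length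
      else pvScanB text rest

def max_partial_sentinel_suffix_py_alt (text : String) : Int :=
  pvScanB text (PySem.List.pyRange (min pvMaxLen (PySem.Str.len text)) 0 (-1))

-- ===== PRECONDITION & SPEC =====
def Spec_max_partial_sentinel_suffix_py (text : String) (out : Int) : Prop := out = max_partial_sentinel_suffix_py_alt text
instance (text : String) (out : Int) : Decidable (Spec_max_partial_sentinel_suffix_py text out) := by unfold Spec_max_partial_sentinel_suffix_py; infer_instance

-- ===== CLAIM (what is proved, stated in full; the proofs are below) =====
def Claim_equal_max_partial_sentinel_suffix_py : Prop := ∀ (text : String), Dom_max_partial_sentinel_suffix_py text → Spec_max_partial_sentinel_suffix_py text (max_partial_sentinel_suffix_py text)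

-- ===== LEMMAS AND PROOFS =====

-- A's test for one sentinel and one length, and B's set-membership test
def pvCond (text s : String) (l : Int) : Bool :=
  PySem.Str.startswith s (PySem.Str.slice text (some (-l)) none)

def pvD (text : String) (l : Int) : Bool :=
  PySem.Set.contains pvPrefixes (PySem.Str.slice text (some (-l)) none)

-- A's inner loop as a function (definitionally the inner foldl of port A)
def pvIF (c : Int → Bool) (L : List Int) (m0 : Int) : Int :=
  L.foldl (fun m l => if c l then (if l > m then l else m) else m) m0

-- A's outer loop as a function (definitionally port A when ss = pvSentinels, m0 = 0)
def pvAFold (text : String) (ss : List String) (m0 : Int) : Int :=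
  ss.foldl (fun m s =>
    pvIF (pvCond text s) (PySem.List.pyRange 1 (min (PySem.Str.len s) (PySem.Str.len text) + 1) 1) m) m0

-- inputs on which A's running max records something, for one sentinel / overall
def pvMatchA (text : String) (l : Int) : Prop :=
  ∃ s ∈ pvSentinels, 1 ≤ l ∧ l < min (PySem.Str.len s) (PySem.Str.len text) + 1 ∧ pvCond text s l = true

theorem pvIF_spec (c : Int → Bool) (L : List Int) : ∀ m0 : Int,
    m0 ≤ pvIF c L m0 ∧ (pvIF c L m0 = m0 ∨ (pvIF c L m0 ∈ L ∧ c (pvIF c L m0) = true)) ∧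
      ∀ l ∈ L, c l = true → l ≤ pvIF c L m0 := by
  induction L with
  | nil => intro m0; simp [pvIF]
  | cons a L ih =>
    intro m0
    have hstep : pvIF c (a :: L) m0 = pvIF c L (if c a then (if a > m0 then a else m0) else m0) := by
      simp [pvIF]
    set m1 := (if c a then (if a > m0 then a else m0) else m0) with hm1
    obtain ⟨ih1, ih2, ih3⟩ := ih m1
    have hm01 : m0 ≤ m1 := by rw [hm1]; split_ifs <;> omega
    rw [hstep]
    refine ⟨by omega, ?_, ?_⟩
    · rcases ih2 with h | ⟨hmem, hc⟩
      · rw [h]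
        by_cases hca : c a = true
        · by_cases hgt : a > m0
          · right
            have hma : m1 = a := by rw [hm1]; simp [hca, hgt]
            rw [hma]; exact ⟨List.mem_cons_self, hca⟩
          · left; rw [hm1]; simp [hca, hgt]
        · left; rw [hm1]; simp [hca]
      · right; exact ⟨List.mem_cons_of_mem _ hmem, hc⟩
    · intro l hl hcl
      rcases List.mem_cons.mp hl with rfl | hl'
      · have : l ≤ m1 := by rw [hm1]; simp [hcl]; split_ifs <;> omega
        omega
      · exact ih3 l hl' hcl


theorem pvAFold_spec (text : String) (ss : List String) : ∀ m0 : Int,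
    m0 ≤ pvAFold text ss m0 ∧
    (pvAFold text ss m0 = m0 ∨ (∃ s ∈ ss, 1 ≤ pvAFold text ss m0 ∧
        pvAFold text ss m0 < min (PySem.Str.len s) (PySem.Str.len text) + 1 ∧
        pvCond text s (pvAFold text ss m0) = true)) ∧
    ∀ s ∈ ss, ∀ l : Int, 1 ≤ l → l < min (PySem.Str.len s) (PySem.Str.len text) + 1 →
      pvCond text s l = true → l ≤ pvAFold text ss m0 := by
  induction ss with
  | nil => intro m0; simp [pvAFold]
  | cons s ss ih =>
    intro m0
    have hstep : pvAFold text (s :: ss) m0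
        = pvAFold text ss (pvIF (pvCond text s)
            (PySem.List.pyRange 1 (min (PySem.Str.len s) (PySem.Str.len text) + 1) 1) m0) := by
      simp [pvAFold]
    set m1 := pvIF (pvCond text s)
        (PySem.List.pyRange 1 (min (PySem.Str.len s) (PySem.Str.len text) + 1) 1) m0 with hm1
    obtain ⟨j1, j2, j3⟩ := pvIF_spec (pvCond text s)
        (PySem.List.pyRange 1 (min (PySem.Str.len s) (PySem.Str.len text) + 1) 1) m0
    obtain ⟨ih1, ih2, ih3⟩ := ih m1
    rw [hstep]
    refine ⟨by omega, ?_, ?_⟩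
    · rcases ih2 with h | ⟨t, ht, h⟩
      · rw [h]
        rcases j2 with h' | ⟨hmem, hc⟩
        · left; exact h'
        · right
          refine ⟨s, List.mem_cons_self, ?_, ?_, hc⟩
          · exact (PySem.List.mem_pyRange_one.mp hmem).1
          · exact (PySem.List.mem_pyRange_one.mp hmem).2
      · right; exact ⟨t, List.mem_cons_of_mem _ ht, h⟩
    · intro t ht l hl1 hl2 hc
      rcases List.mem_cons.mp ht with rfl | ht'
      · have : l ≤ m1 := j3 l (PySem.List.mem_pyRange_one.mpr ⟨hl1, hl2⟩) hc
        omega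
      · exact ih3 t ht' l hl1 hl2 hc


theorem pvScanB_spec (text : String) (k : Nat) : ∀ m : Int, m ≤ (k : Int) →
    (pvScanB text (PySem.List.pyRange m 0 (-1)) = 0 ∧ ∀ l : Int, 0 < l → l ≤ m → pvD text l = false)
  ∨ (0 < pvScanB text (PySem.List.pyRange m 0 (-1)) ∧
     pvScanB text (PySem.List.pyRange m 0 (-1)) ≤ m ∧
     pvD text (pvScanB text (PySem.List.pyRange m 0 (-1))) = true ∧
     ∀ l : Int, 0 < l → l ≤ m → pvD text l = true → l ≤ pvScanB text (PySem.List.pyRange m 0 (-1))) := by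
  induction k with
  | zero =>
    intro m hm
    rw [PySem.List.pyRange_neg_one_eq_nil (by omega)]
    left; exact ⟨rfl, fun l h1 h2 => by omega⟩
  | succ k ih =>
    intro m hm
    by_cases hm0 : m ≤ 0
    · rw [PySem.List.pyRange_neg_one_eq_nil (by omega)]
      left; exact ⟨rfl, fun l h1 h2 => by omega⟩
    · rw [PySem.List.pyRange_neg_one_cons (by omega)]
      by_cases hd : pvD text m = true
      · have : pvScanB text (m :: PySem.List.pyRange (m - 1) 0 (-1)) = m := by
          simp only [pvScanB]
          rw [show PySem.Set.contains pvPrefixes (PySem.Str.slice text (some (-m)) none)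
              = pvD text m from rfl, hd]
          simp
        rw [this]
        right
        exact ⟨by omega, le_refl m, hd, fun l h1 h2 _ => h2⟩
      · have hne : pvD text m = false := by simpa using hd
        have : pvScanB text (m :: PySem.List.pyRange (m - 1) 0 (-1))
            = pvScanB text (PySem.List.pyRange (m - 1) 0 (-1)) := by
          simp only [pvScanB]
          rw [show PySem.Set.contains pvPrefixes (PySem.Str.slice text (some (-m)) none)
              = pvD text m from rfl, hne]
          simp
        rw [this]
        rcases ih (m - 1) (by omega) with ⟨h0, hnone⟩ | ⟨h1, h2, h3, h4⟩
        · left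
          refine ⟨h0, fun l hl1 hl2 => ?_⟩
          by_cases hlm : l = m
          · rw [hlm]; exact hne
          · exact hnone l hl1 (by omega)
        · right
          refine ⟨h1, by omega, h3, fun l hl1 hl2 hdl => ?_⟩
          by_cases hlm : l = m
          · rw [hlm] at hdl; rw [hne] at hdl; exact absurd hdl (by simp)
          · exact h4 l hl1 (by omega) hdl


theorem pvSuffix_toList (text : String) (k : Nat) (hk : 0 < k) :
    (PySem.Str.slice text (some (-(k : Int))) none).toList
      = text.toList.drop (text.toList.length - k) := by
  rw [PySem.Str.toList_slice, PySem.Chars.slice_eq_listSlice,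
     PySem.List.slice_from_neg_natCast _ _ hk]

theorem pvSlice_eq_iff (s text : String) (l : Int) (h1 : 1 ≤ l) (h2 : l ≤ PySem.Str.len text) :
    (∃ i : Int, (1 ≤ i ∧ i < PySem.Str.len s + 1) ∧
        PySem.Str.slice s none (some i) = PySem.Str.slice text (some (-l)) none)
    ↔ (l ≤ PySem.Str.len s ∧ pvCond text s l = true) := by
  have hlen := PySem.Str.len_eq text
  have hlens := PySem.Str.len_eq s
  lift l to ℕ using (by omega) with k
  have hk : 0 < k := by exact_mod_cast h1
  have hkn : k ≤ text.toList.length := by rw [hlen] at h2; exact_mod_cast h2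
  have hsuf := pvSuffix_toList text k hk
  have hsuflen : (PySem.Str.slice text (some (-(k:Int))) none).toList.length = k := by
    rw [hsuf, List.length_drop]; omega
  constructor
  · rintro ⟨i, ⟨hi1, hi2⟩, heq⟩
    lift i to ℕ using (by omega) with j
    have hjs : j ≤ s.toList.length := by rw [hlens] at hi2; exact_mod_cast (by omega : (j:Int) ≤ s.toList.length)
    have htl : (PySem.Str.slice s none (some (j:Int))).toList
        = s.toList.take j := by
      rw [PySem.Str.toList_slice, PySem.Chars.slice_eq_listSlice,
         PySem.List.slice_to _ (by positivity), Int.toNat_natCast]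
    have hjk : j = k := by
      have := congrArg (fun t => t.toList.length) heq
      simp only [htl, hsuflen, List.length_take] at this
      omega
    subst hjk
    constructor
    · rw [hlens]; exact_mod_cast hjs
    · unfold pvCond
      rw [PySem.Str.startswith_eq]
      unfold PySem.Chars.startswith
      rw [List.isPrefixOf_iff_prefix]
      have : (PySem.Str.slice text (some (-(j:Int))) none).toList = s.toList.take j := by
        rw [← heq, htl]
      rw [this]
      exact List.take_prefix j s.toList
  · rintro ⟨hls, hc⟩
    refine ⟨(k : Int), ⟨by exact_mod_cast h1, by omega⟩, ?_⟩
    apply String.toList_inj.mp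
    have htl : (PySem.Str.slice s none (some (k:Int))).toList = s.toList.take k := by
      rw [PySem.Str.toList_slice, PySem.Chars.slice_eq_listSlice,
         PySem.List.slice_to _ (by positivity), Int.toNat_natCast]
    unfold pvCond at hc
    rw [PySem.Str.startswith_eq] at hc
    unfold PySem.Chars.startswith at hc
    rw [List.isPrefixOf_iff_prefix] at hc
    have := List.prefix_iff_eq_take.mp hc
    rw [hsuflen] at this
    rw [htl, ← this]

theorem pvMember_iff (text : String) (l : Int) (h1 : 1 ≤ l) (h2 : l ≤ PySem.Str.len text) :
    pvD text l = true ↔ ∃ s ∈ pvSentinels, l ≤ PySem.Str.len s ∧ pvCond text s l = true := by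
  unfold pvD pvPrefixes PySem.Set.contains
  rw [List.contains_iff_mem, PySem.Set.mem_ofList, List.mem_flatMap]
  constructor
  · rintro ⟨s, hs, hmem⟩
    simp only [List.mem_map, PySem.List.mem_pyRange_one] at hmem
    obtain ⟨i, hi, heq⟩ := hmem
    exact ⟨s, hs, (pvSlice_eq_iff s text l h1 h2).mp ⟨i, hi, heq⟩⟩
  · rintro ⟨s, hs, hls, hc⟩
    obtain ⟨i, hi, heq⟩ := (pvSlice_eq_iff s text l h1 h2).mpr ⟨hls, hc⟩
    refine ⟨s, hs, ?_⟩
    simp only [List.mem_map, PySem.List.mem_pyRange_one]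
    exact ⟨i, hi, heq⟩


theorem pvMatchA_iff (text : String) (l : Int) :
    pvMatchA text l ↔ (1 ≤ l ∧ l ≤ min pvMaxLen (PySem.Str.len text) ∧ pvD text l = true) := by
  constructor
  · rintro ⟨s, hs, h1, h2, hc⟩
    have hsm : PySem.Str.len s ≤ pvMaxLen := by
      fin_cases hs <;> decide
    have h2' : l ≤ PySem.Str.len text := by omega
    refine ⟨h1, by omega, ?_⟩
    exact (pvMember_iff text l h1 h2').mpr ⟨s, hs, by omega, hc⟩
  · rintro ⟨h1, h2, hd⟩
    have h2' : l ≤ PySem.Str.len text := by omega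
    obtain ⟨s, hs, hls, hc⟩ := (pvMember_iff text l h1 h2').mp hd
    exact ⟨s, hs, h1, by omega, hc⟩


-- ===== VERDICT (by name: the statement is the Claim_ definition above) =====
theorem max_partial_sentinel_suffix_py_spec : Claim_equal_max_partial_sentinel_suffix_py := by
  intro text _
  unfold Spec_max_partial_sentinel_suffix_py
  have hA : max_partial_sentinel_suffix_py text = pvAFold text pvSentinels 0 := rfl
  have hB : max_partial_sentinel_suffix_py_alt text
      = pvScanB text (PySem.List.pyRange (min pvMaxLen (PySem.Str.len text)) 0 (-1)) := rfl
  obtain ⟨hA0, hAcase, hAub⟩ := pvAFold_spec text pvSentinels 0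
  have hmle : min pvMaxLen (PySem.Str.len text) ≤ ((15 + text.toList.length : Nat) : Int) := by
    have : pvMaxLen = 15 := by decide
    simp only [this, PySem.Str.len_eq]; omega
  have hS := pvScanB_spec text (15 + text.toList.length) (min pvMaxLen (PySem.Str.len text)) hmle
  rw [hA, hB]
  set rA := pvAFold text pvSentinels 0 with hrA
  set rB := pvScanB text (PySem.List.pyRange (min pvMaxLen (PySem.Str.len text)) 0 (-1)) with hrB
  have hAmatch : rA = 0 ∨ pvMatchA text rA := by
    rcases hAcase with h | ⟨s, hs, h1, h2, hc⟩
    · left; exact h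
    · right; exact ⟨s, hs, h1, h2, hc⟩
  have hAub' : ∀ l : Int, pvMatchA text l → l ≤ rA := by
    rintro l ⟨s, hs, h1, h2, hc⟩; exact hAub s hs l h1 h2 hc
  rcases hS with ⟨hB0, hBnone⟩ | ⟨hBpos, hBle, hBd, hBub⟩
  · -- B found nothing: A cannot have matched either
    rcases hAmatch with h | hm
    · omega
    · exfalso
      rcases (pvMatchA_iff text rA).mp hm with ⟨h1, h2, hd⟩
      have := hBnone rA (by omega) h2
      simp [this] at hd
  · -- B found rB, the largest match ≤ min(maxlen, n)
    have hBmatch : pvMatchA text rB := (pvMatchA_iff text rB).mpr ⟨by omega, hBle, hBd⟩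
    have h1 : rB ≤ rA := hAub' rB hBmatch
    have h2 : rA ≤ rB := by
      rcases hAmatch with h | hm
      · omega
      · rcases (pvMatchA_iff text rA).mp hm with ⟨ha1, ha2, had⟩
        exact hBub rA (by omega) ha2 had
    omega
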